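-- pv_equiv track=rewrite | github.com/venantvr-security/Python.HAR.ZAP | modules/zap_scanner.py | _get_policy_for_target
-- ===== SOURCE A (Python) =====
-- from typing import Dict, List
--
-- def _get_policy_for_target(target: Dict) -> str:
--     params = target.get('params', [])
--
--     if any('sql' in p.lower() or 'id' in p.lower() for p in params):
--         return 'SQL-Injection'
--     elif any('file' in p.lower() or 'path' in p.lower() for p in params):
--         return 'Path-Traversal'
--     else:
--         return 'Default Policy'
-- ===== SOURCE B (Python) =====
-- def _rank(p):
--     q = p.lower()
--     if 'sql' in q or 'id' in q:
--         return 2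
--     if 'file' in q or 'path' in q:
--         return 1
--     return 0
--
-- _POLICIES = ('Default Policy', 'Path-Traversal', 'SQL-Injection')
--
-- def _get_policy_for_target(target):
--     best = 0
--     for p in target.get('params', []):
--         best = max(best, _rank(p))
--     return _POLICIES[best]
-- ===== Notes on version B (the rewrite author's own statement) =====
-- stated objective: alternative
-- what changed: Replaces A's staged boolean any() scans by a per-param numeric severity rank (2=SQL/id, 1=file/path, 0=none), a running maximum over the params, and a lookup of the winning rank in a policy table.
import Mathlib
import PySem

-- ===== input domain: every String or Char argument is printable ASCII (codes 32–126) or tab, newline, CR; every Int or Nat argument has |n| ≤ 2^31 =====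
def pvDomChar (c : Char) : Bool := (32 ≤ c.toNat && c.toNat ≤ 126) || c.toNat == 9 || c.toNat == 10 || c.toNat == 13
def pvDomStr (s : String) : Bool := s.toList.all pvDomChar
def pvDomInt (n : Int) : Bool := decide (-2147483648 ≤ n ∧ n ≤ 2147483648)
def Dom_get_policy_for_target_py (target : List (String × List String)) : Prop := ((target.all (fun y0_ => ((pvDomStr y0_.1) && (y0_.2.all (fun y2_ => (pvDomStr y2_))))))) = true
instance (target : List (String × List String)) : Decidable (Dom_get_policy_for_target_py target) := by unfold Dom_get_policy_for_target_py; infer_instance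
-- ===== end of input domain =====

-- B replaces A's staged any() scans by a per-param numeric severity rank, a running
-- maximum, and a policy-table lookup; same cost, alternative decomposition.

-- ===== PORT A =====
def get_policy_for_target_py (target : List (String × List String)) : String :=
  let params := PySem.Dict.getD (PySem.Dict.mk target) "params" []
  if params.any (fun p =>
      PySem.Str.isIn "sql" (PySem.Str.lower p) || PySem.Str.isIn "id" (PySem.Str.lower p)) then
    "SQL-Injection"
  else if params.any (fun p =>
      PySem.Str.isIn "file" (PySem.Str.lower p) || PySem.Str.isIn "path" (PySem.Str.lower p)) then
    "Path-Traversal"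
  else
    "Default Policy"

-- ===== PORT B =====
-- severity rank of one param (Source B's _rank)
def pvRank (p : String) : Nat :=
  let q := PySem.Str.lower p
  if PySem.Str.isIn "sql" q || PySem.Str.isIn "id" q then 2
  else if PySem.Str.isIn "file" q || PySem.Str.isIn "path" q then 1
  else 0

-- Source B's _POLICIES tuple, indexed by rank (indices 0,1,2 written out)
def pvPolicies (i : Nat) : String :=
  if i = 0 then "Default Policy"
  else if i = 1 then "Path-Traversal"
  else "SQL-Injection"

def get_policy_for_target_py_alt (target : List (String × List String)) : String :=
  let params := PySem.Dict.getD (PySem.Dict.mk target) "params" []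
  let best := params.foldl (fun m p => max m (pvRank p)) 0
  pvPolicies best

-- ===== PRECONDITION & SPEC =====
def Spec_get_policy_for_target_py (target : List (String × List String)) (out : String) : Prop := out = get_policy_for_target_py_alt target
instance (target : List (String × List String)) (out : String) : Decidable (Spec_get_policy_for_target_py target out) := by unfold Spec_get_policy_for_target_py; infer_instance

-- ===== CLAIM =====
def Claim_equal_get_policy_for_target_py : Prop := ∀ (target : List (String × List String)), Dom_get_policy_for_target_py target → Spec_get_policy_for_target_py target (get_policy_for_target_py target)

-- ===== LEMMAS AND PROOFS =====

-- The running maximum of ranks is determined by the two any() predicates of A.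
theorem pv_fold_rank (ps : List String) (a : Nat) :
    ps.foldl (fun m p => max m (pvRank p)) a
    = max a (if ps.any (fun p => PySem.Str.isIn "sql" (PySem.Str.lower p) || PySem.Str.isIn "id" (PySem.Str.lower p)) then 2
             else if ps.any (fun p => PySem.Str.isIn "file" (PySem.Str.lower p) || PySem.Str.isIn "path" (PySem.Str.lower p)) then 1
             else 0) := by
  induction ps generalizing a with
  | nil => simp
  | cons p ps ih =>
    rw [List.foldl_cons, ih]
    simp only [List.any_cons, pvRank]
    rcases Bool.eq_false_or_eq_true (PySem.Str.isIn "sql" (PySem.Str.lower p) || PySem.Str.isIn "id" (PySem.Str.lower p)) with hs | hs <;>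
    rcases Bool.eq_false_or_eq_true (PySem.Str.isIn "file" (PySem.Str.lower p) || PySem.Str.isIn "path" (PySem.Str.lower p)) with hp | hp <;>
    rcases Bool.eq_false_or_eq_true (ps.any (fun p => PySem.Str.isIn "sql" (PySem.Str.lower p) || PySem.Str.isIn "id" (PySem.Str.lower p))) with hS | hS <;>
    rcases Bool.eq_false_or_eq_true (ps.any (fun p => PySem.Str.isIn "file" (PySem.Str.lower p) || PySem.Str.isIn "path" (PySem.Str.lower p))) with hP | hP <;>
    simp only [hs, hp, hS, hP] <;> simp

-- A's staged decision equals B's ranked-maximum lookup, for any param list.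
theorem pv_main (ps : List String) :
    (if ps.any (fun p => PySem.Str.isIn "sql" (PySem.Str.lower p) || PySem.Str.isIn "id" (PySem.Str.lower p)) then "SQL-Injection"
     else if ps.any (fun p => PySem.Str.isIn "file" (PySem.Str.lower p) || PySem.Str.isIn "path" (PySem.Str.lower p)) then "Path-Traversal"
     else "Default Policy")
    = pvPolicies (ps.foldl (fun m p => max m (pvRank p)) 0) := by
  rw [pv_fold_rank]
  rcases Bool.eq_false_or_eq_true (ps.any (fun p => PySem.Str.isIn "sql" (PySem.Str.lower p) || PySem.Str.isIn "id" (PySem.Str.lower p))) with hS | hS <;>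
  rcases Bool.eq_false_or_eq_true (ps.any (fun p => PySem.Str.isIn "file" (PySem.Str.lower p) || PySem.Str.isIn "path" (PySem.Str.lower p))) with hP | hP <;>
  rw [hS, hP] <;> simp [pvPolicies]

-- ===== VERDICT =====
theorem get_policy_for_target_py_spec : Claim_equal_get_policy_for_target_py := by
  intro target _
  unfold Spec_get_policy_for_target_py get_policy_for_target_py get_policy_for_target_py_alt
  exact pv_main (PySem.Dict.getD (PySem.Dict.mk target) "params" [])
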